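-- pv_equiv track=rewrite | github.com/MrBrantCode/unitest_baseline | mut_generate/mist_train_cf/cf_70302/solution.py | swapElements
-- ===== SOURCE A (Python) =====
-- def swapElements(lst1, lst2):
--     lst1_odd = [i for i in lst1 if i%2 != 0]
--     lst2_even = [i for i in lst2 if i%2 == 0]
--
--     lst1_even = [i for i in lst1 if i%2 == 0]
--     lst2_odd = [i for i in lst2 if i%2 != 0]
--
--     for i in range(min(len(lst1_odd), len(lst2_even))):
--         lst1_even.append(lst2_even[i])
--         lst2_odd.append(lst1_odd[i])
--
--     return "YES" if (sum(lst1_even) - sum(lst1_odd)) == (sum(lst2_even) - sum(lst2_odd)) else "NO"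
-- ===== SOURCE B (Python) =====
-- def swapElements(lst1, lst2):
--     # Key fact: each swapped pair (an odd moved out of lst1, an even moved out of lst2)
--     # contributes 0 to the difference of differences, so paired elements cancel and
--     # only the unpaired ones need to be summed.
--     m = min(sum(1 for x in lst1 if x % 2 != 0), sum(1 for x in lst2 if x % 2 == 0))
--     q = 0
--     skip = m
--     for x in lst1:
--         if x % 2 == 0:
--             q += x
--         elif skip > 0:
--             skip -= 1
--         else:
--             q -= x
--     skip = m
--     for x in lst2:
--         if x % 2 != 0:
--             q += x
--         elif skip > 0:
--             skip -= 1
--         else: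
--             q -= x
--     return "YES" if q == 0 else "NO"
-- ===== Notes on version B (the rewrite author's own statement) =====
-- stated objective: alternative
-- what changed: B exploits the cancellation identity that each swapped pair (an odd leaving lst1, an even leaving lst2) contributes zero to the difference-of-differences, so it builds no lists at all: it counts parities to get m, then two skip-counter passes accumulate only the unpaired elements' contributions into a single integer.
import Mathlib
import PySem

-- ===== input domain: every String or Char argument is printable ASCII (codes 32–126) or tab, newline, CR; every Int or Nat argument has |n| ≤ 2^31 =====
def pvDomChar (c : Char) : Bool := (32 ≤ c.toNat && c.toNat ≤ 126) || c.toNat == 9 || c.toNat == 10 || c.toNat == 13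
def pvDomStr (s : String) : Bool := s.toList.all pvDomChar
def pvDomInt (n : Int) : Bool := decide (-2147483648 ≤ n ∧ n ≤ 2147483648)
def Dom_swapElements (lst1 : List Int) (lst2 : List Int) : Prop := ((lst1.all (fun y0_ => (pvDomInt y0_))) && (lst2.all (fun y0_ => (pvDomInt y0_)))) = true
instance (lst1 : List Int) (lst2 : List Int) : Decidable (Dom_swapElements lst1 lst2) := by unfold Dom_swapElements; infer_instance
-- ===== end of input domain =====

-- B uses the cancellation of each swapped pair: it builds no lists, only counts
-- parities and accumulates the unpaired elements' contributions (objective: alternative).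

-- ===== PORT A =====
def swapElements (lst1 : List Int) (lst2 : List Int) : String :=
  let lst1_odd := lst1.filter (fun i => PySem.Int.mod i 2 != 0)
  let lst2_even := lst2.filter (fun i => PySem.Int.mod i 2 == 0)
  let lst1_even := lst1.filter (fun i => PySem.Int.mod i 2 == 0)
  let lst2_odd := lst2.filter (fun i => PySem.Int.mod i 2 != 0)
  let p := (PySem.List.pyRange 0 ((min lst1_odd.length lst2_even.length : Nat) : Int) 1).foldl
    (fun (st : List Int × List Int) i =>
      (st.1 ++ [PySem.List.pyGetD lst2_even i 0], st.2 ++ [PySem.List.pyGetD lst1_odd i 0]))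
    (lst1_even, lst2_odd)
  if (p.1.sum - lst1_odd.sum) == (lst2_even.sum - p.2.sum) then "YES" else "NO"

-- ===== PORT B =====
def swapElements_alt (lst1 : List Int) (lst2 : List Int) : String :=
  let m : Int := min (lst1.foldl (fun c x => c + (if PySem.Int.mod x 2 != 0 then 1 else 0)) 0)
                     (lst2.foldl (fun c x => c + (if PySem.Int.mod x 2 == 0 then 1 else 0)) 0)
  let p1 := lst1.foldl (fun (st : Int × Int) x =>
      if PySem.Int.mod x 2 == 0 then (st.1 + x, st.2)
      else if st.2 > 0 then (st.1, st.2 - 1)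
      else (st.1 - x, st.2)) (0, m)
  let p2 := lst2.foldl (fun (st : Int × Int) x =>
      if PySem.Int.mod x 2 != 0 then (st.1 + x, st.2)
      else if st.2 > 0 then (st.1, st.2 - 1)
      else (st.1 - x, st.2)) (p1.1, m)
  if p2.1 == 0 then "YES" else "NO"

-- ===== PRECONDITION & SPEC =====
def Spec_swapElements (lst1 : List Int) (lst2 : List Int) (out : String) : Prop := out = swapElements_alt lst1 lst2
instance (lst1 : List Int) (lst2 : List Int) (out : String) : Decidable (Spec_swapElements lst1 lst2 out) := by unfold Spec_swapElements; infer_instance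

-- ===== CLAIM (what is proved, stated in full; the proofs are below) =====
def Claim_equal_swapElements : Prop := ∀ (lst1 : List Int) (lst2 : List Int), Dom_swapElements lst1 lst2 → Spec_swapElements lst1 lst2 (swapElements lst1 lst2)

-- ===== LEMMAS AND PROOFS =====

-- B's counting pass is countP (as an Int).
lemma foldl_count (q : Int → Bool) (l : List Int) (a : Int) :
    l.foldl (fun c x => c + (if q x then 1 else 0)) a = a + (l.countP q : Int) := by
  induction l generalizing a with
  | nil => simp
  | cons x xs ih =>
    by_cases h : q x <;> simp [h, ih] <;> push_cast <;> ring_nf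

-- B's skip-counter pass: adds kept elements, subtracts dropped-parity elements past the first s.
lemma foldl_skip (keep : Int → Bool) (l : List Int) (q s : Int) (hs : 0 ≤ s) :
    l.foldl (fun (st : Int × Int) x =>
        if keep x then (st.1 + x, st.2)
        else if st.2 > 0 then (st.1, st.2 - 1)
        else (st.1 - x, st.2)) (q, s)
      = (q + (l.filter keep).sum - ((l.filter (fun x => !keep x)).drop s.toNat).sum,
         max 0 (s - ((l.countP (fun x => !keep x) : Nat) : Int))) := by
  induction l generalizing q s with
  | nil => simp; omega
  | cons x xs ih =>
    rw [List.foldl_cons]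
    by_cases h : keep x
    · rw [if_pos h, ih _ _ hs]
      simp only [List.filter_cons, List.countP_cons, h, Bool.not_true, reduceIte, List.sum_cons, Prod.mk.injEq]
      refine ⟨by simp <;> omega, by simp⟩
    · rw [if_neg h]
      by_cases hsp : s > 0
      · rw [if_pos hsp, ih _ _ (by omega)]
        have ht : s.toNat = (s - 1).toNat + 1 := by omega
        simp only [List.filter_cons, List.countP_cons, h, Bool.not_false, reduceIte,
          ht, List.drop_succ_cons, Prod.mk.injEq]
        refine ⟨by simp <;> omega, by simp <;> omega⟩
      · have hs0 : s = 0 := by omega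
        rw [if_neg hsp, ih _ _ hs]
        simp only [List.filter_cons, List.countP_cons, h, Bool.not_false, reduceIte,
          hs0, Int.toNat_zero, List.drop_zero, List.sum_cons, Prod.mk.injEq]
        refine ⟨by simp <;> omega, by simp <;> omega⟩

-- reading the first m elements of u by index yields u.take m
lemma map_pyGetD_take (u : List Int) (m : Nat) (h : m ≤ u.length) :
    (PySem.List.pyRange 0 (m : Int) 1).map (fun i => PySem.List.pyGetD u i 0) = u.take m := by
  induction m with
  | zero => simp [PySem.List.pyRange_one_eq_nil]
  | succ k ih =>
    have hk : k ≤ u.length := by omega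
    have hcast : ((k + 1 : Nat) : Int) = (k : Int) + 1 := by push_cast; ring
    rw [hcast, PySem.List.pyRange_one_succ_right (by positivity), List.map_append, ih hk,
        List.take_add_one]
    simp [PySem.List.pyGetD_natCast, List.getD_eq_getElem?_getD,
      List.getElem?_eq_getElem (by omega : k < u.length)]

-- ===== VERDICT (by name: the statement is the Claim_ definition above) =====
theorem swapElements_spec : Claim_equal_swapElements := by
  intro lst1 lst2 _
  unfold Spec_swapElements swapElements swapElements_alt
  dsimp only
  refine if_congr ?_ rfl rfl
  set odds1 := lst1.filter (fun i => PySem.Int.mod i 2 != 0) with h1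
  set evens2 := lst2.filter (fun i => PySem.Int.mod i 2 == 0) with h2
  -- A side: the append loop builds the two take-m prefixes
  rw [PySem.List.foldl_prod_mk
        (fun acc i => acc ++ [PySem.List.pyGetD evens2 i 0])
        (fun acc i => acc ++ [PySem.List.pyGetD odds1 i 0]),
      PySem.List.foldl_append_singleton_eq_map, PySem.List.foldl_append_singleton_eq_map]
  set mN : Nat := min odds1.length evens2.length with hm
  rw [map_pyGetD_take evens2 mN (by omega), map_pyGetD_take odds1 mN (by omega)]
  -- B side: counting passes and skip passes
  rw [foldl_count, foldl_count]
  have hmc : min (0 + ((lst1.countP fun x => PySem.Int.mod x 2 != 0) : Int))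
                 (0 + ((lst2.countP fun x => PySem.Int.mod x 2 == 0) : Int)) = (mN : Int) := by
    simp only [zero_add, hm, List.countP_eq_length_filter, h1, h2]
    omega
  rw [hmc, foldl_skip _ _ _ _ (by positivity), foldl_skip _ _ _ _ (by positivity)]
  have hf1 : (lst1.filter fun x => !(PySem.Int.mod x 2 == 0)) = odds1 := by
    simp [h1, bne]
  have hf2 : (lst2.filter fun x => !(PySem.Int.mod x 2 != 0)) = evens2 := by
    simp [h2, bne]
  rw [hf1, hf2]
  simp only [beq_iff_eq, List.sum_append, Int.toNat_natCast]
  have e1 : (evens2.take mN).sum + (evens2.drop mN).sum = evens2.sum := by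
    rw [← List.sum_append, List.take_append_drop]
  have e2 : (odds1.take mN).sum + (odds1.drop mN).sum = odds1.sum := by
    rw [← List.sum_append, List.take_append_drop]
  omega
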